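-- pv_equiv track=rewrite | github.com/luketibbott/leetcode | dist-candies.py | dist_candies
-- ===== SOURCE A (Python) =====
-- from collections import Counter
--
-- def dist_candies(candies):
--
--     # Lowest possible occurs when brother gets half and sister gets half
--     num_sister = len(set(candies))//2
--
--     num_candies = Counter(candies)
--
--     for candy in num_candies.keys():
--         num_this_candy = num_candies[candy]
--
--         if num_this_candy%2 == 1:
--             num_sister += 1
--
--     return num_sister
-- ===== SOURCE B (Python) =====
-- def dist_candies(candies):
--     # Sort, then one linear scan over runs of equal adjacent values:
--     # count distinct runs and runs of odd length; answer = distinct//2 + odd_runs.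
--     s = sorted(candies)
--     distinct = 0
--     odd = 0
--     run = 0
--     prev = None
--     for x in s:
--         if run and x == prev:
--             run += 1
--         else:
--             distinct += 1
--             odd += run % 2
--             run = 1
--             prev = x
--     odd += run % 2
--     return distinct // 2 + odd
-- ===== Notes on version B (the rewrite author's own statement) =====
-- stated objective: alternative
-- what changed: Replaces the hash-based Counter frequency table by sorting followed by a single adjacent-run scan: runs of equal neighbours give the distinct count and the odd-frequency count, so no frequency table is ever built.
import Mathlib
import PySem

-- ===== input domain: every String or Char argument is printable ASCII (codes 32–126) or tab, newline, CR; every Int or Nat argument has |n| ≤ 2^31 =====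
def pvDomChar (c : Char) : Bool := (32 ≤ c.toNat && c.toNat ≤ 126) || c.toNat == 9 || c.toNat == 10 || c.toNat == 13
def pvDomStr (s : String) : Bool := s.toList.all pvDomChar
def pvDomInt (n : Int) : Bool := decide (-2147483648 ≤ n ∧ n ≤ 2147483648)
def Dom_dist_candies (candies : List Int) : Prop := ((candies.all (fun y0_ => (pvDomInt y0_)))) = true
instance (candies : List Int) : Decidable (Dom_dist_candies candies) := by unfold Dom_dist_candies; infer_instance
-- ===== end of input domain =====

-- B replaces the Counter frequency table by sorting plus one adjacent-run scan (objective: alternative).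

-- ===== PORT A =====
-- Port of A: len(set(candies))//2, then Counter(candies), then count odd frequencies.
-- (Counter's d[k] returns 0 for a missing key, so it is exactly Dict.getD k 0.)
def dist_candies (candies : List Int) : Int :=
  let num_sister : Int := PySem.Int.floordiv ((PySem.Set.ofList candies).length : Int) 2
  let num_candies : PySem.Dict Int Int := PySem.Dict.counter candies
  num_candies.keys.foldl (fun num_sister candy =>
    let num_this_candy := num_candies.getD candy 0
    if PySem.Int.mod num_this_candy 2 == 1 then num_sister + 1 else num_sister) num_sister

-- ===== PORT B =====
-- Loop body of B's for-loop: state = (distinct, odd, run, prev).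
def pvStep (st : Int × Int × Int × Option Int) (x : Int) : Int × Int × Int × Option Int :=
  if st.2.2.1 ≠ 0 ∧ some x = st.2.2.2 then (st.1, st.2.1, st.2.2.1 + 1, st.2.2.2)
  else (st.1 + 1, st.2.1 + PySem.Int.mod st.2.2.1 2, 1, some x)

-- Port of B: sort, then a single pass detecting runs of equal adjacent values.
def dist_candies_alt (candies : List Int) : Int :=
  let s := PySem.List.sorted candies (fun v => v) false
  let st := s.foldl pvStep (0, 0, 0, none)
  PySem.Int.floordiv st.1 2 + (st.2.1 + PySem.Int.mod st.2.2.1 2)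

-- ===== PRECONDITION & SPEC =====
def Spec_dist_candies (candies : List Int) (out : Int) : Prop := out = dist_candies_alt candies
instance (candies : List Int) (out : Int) : Decidable (Spec_dist_candies candies out) := by unfold Spec_dist_candies; infer_instance

-- ===== CLAIM (what is proved, stated in full; the proofs are below) =====
def Claim_equal_dist_candies : Prop := ∀ (candies : List Int), Dom_dist_candies candies → Spec_dist_candies candies (dist_candies candies)

-- ===== LEMMAS AND PROOFS =====

-- Reference run decomposition of a (sorted) list.
def runsRef : List Int → Int × Int
  | [] => (0, 0)
  | x :: t =>
    let t1 := t.takeWhile (fun y => y == x)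
    let t2 := t.dropWhile (fun y => y == x)
    let p := runsRef t2
    (p.1 + 1, p.2 + PySem.Int.mod (1 + (t1.length : Int)) 2)
termination_by l => l.length
decreasing_by
  simp only [List.length_cons]
  exact Nat.lt_succ_of_le (t.dropWhile_sublist _).length_le

lemma runsRef_cons1 (x : Int) (t : List Int) :
    (runsRef (x :: t)).1 = (runsRef (t.dropWhile (fun y => y == x))).1 + 1 := by
  rw [runsRef]

lemma runsRef_cons2 (x : Int) (t : List Int) :
    (runsRef (x :: t)).2 = (runsRef (t.dropWhile (fun y => y == x))).2
      + PySem.Int.mod (1 + ((t.takeWhile (fun y => y == x)).length : Int)) 2 := by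
  rw [runsRef]

lemma pvStep_absorb (k : Nat) (d o r : Int) (p : Int) (hr : 1 ≤ r) :
    (List.replicate k p).foldl pvStep (d, o, r, some p) = (d, o, r + (k : Int), some p) := by
  induction k generalizing r with
  | zero => simp
  | succ n ih =>
    rw [List.replicate_succ, List.foldl_cons]
    have hr0 : r ≠ 0 := by omega
    have h1 : pvStep (d, o, r, some p) p = (d, o, r + 1, some p) := by
      simp [pvStep, hr0]
    rw [h1, ih (r + 1) (by omega)]
    simp only [Prod.mk.injEq, true_and, and_true]
    push_cast
    ring

lemma takeWhile_eq_replicate (t : List Int) (x : Int) :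
    t.takeWhile (fun y => y == x) = List.replicate (t.takeWhile (fun y => y == x)).length x := by
  apply List.eq_replicate_of_mem
  intro y hy
  have := List.mem_takeWhile_imp hy
  simpa using this

lemma foldl_run (t : List Int) (x d o : Int) :
    t.foldl pvStep (d, o, 1, some x)
      = (t.dropWhile (fun y => y == x)).foldl pvStep
          (d, o, 1 + ((t.takeWhile (fun y => y == x)).length : Int), some x) := by
  conv_lhs => rw [← List.takeWhile_append_dropWhile (p := fun y => y == x) (l := t)]
  rw [List.foldl_append]
  conv_lhs => rw [takeWhile_eq_replicate t x]
  rw [pvStep_absorb _ d o 1 x (by norm_num)]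

lemma dropWhile_head_ne (t : List Int) (x y : Int) (t2 : List Int)
    (h : t.dropWhile (fun y => y == x) = y :: t2) : y ≠ x := by
  have := List.head?_dropWhile_not (fun y => y == x) t
  rw [h] at this
  simpa using this

lemma pvStep_main : ∀ (n : Nat) (t : List Int), t.length = n → ∀ (x d o : Int),
    (x :: t).Pairwise (· ≤ ·) →
    (t.foldl pvStep (d + 1, o, 1, some x)).1 = d + (runsRef (x :: t)).1 ∧
    (t.foldl pvStep (d + 1, o, 1, some x)).2.1
      + PySem.Int.mod (t.foldl pvStep (d + 1, o, 1, some x)).2.2.1 2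
      = o + (runsRef (x :: t)).2 := by
  intro n
  induction n using Nat.strong_induction_on with
  | _ n ih =>
  intro t hn x d o hsort
  rw [foldl_run]
  cases ht2e : t.dropWhile (fun y => y == x) with
  | nil =>
    refine ⟨?_, ?_⟩
    · rw [runsRef_cons1, ht2e]
      show d + 1 = d + ((runsRef []).1 + 1)
      simp [runsRef]
    · rw [runsRef_cons2, ht2e]
      show o + PySem.Int.mod (1 + ((t.takeWhile (fun y => y == x)).length : Int)) 2
        = o + ((runsRef []).2 + PySem.Int.mod (1 + ((t.takeWhile (fun y => y == x)).length : Int)) 2)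
      simp [runsRef]
  | cons y t2' =>
    have hyx : y ≠ x := dropWhile_head_ne t x y t2' ht2e
    have hstep : pvStep (d + 1, o, 1 + (((t.takeWhile (fun y => y == x)).length : Nat) : Int), some x) y
        = (d + 1 + 1, o + PySem.Int.mod (1 + (((t.takeWhile (fun y => y == x)).length : Nat) : Int)) 2, 1, some y) := by
      simp [pvStep, hyx]
    have hsort2 : (y :: t2').Pairwise (· ≤ ·) := by
      have ht' : t.Pairwise (· ≤ ·) := (List.pairwise_cons.mp hsort).2
      have h2 : (t.dropWhile (fun y => y == x)).Pairwise (· ≤ ·) :=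
        List.Pairwise.sublist (t.dropWhile_sublist _) ht'
      rwa [ht2e] at h2
    have hlen : t2'.length < n := by
      have h1 : (t.dropWhile (fun y => y == x)).length ≤ t.length :=
        (t.dropWhile_sublist _).length_le
      rw [ht2e] at h1; simp at h1; omega
    obtain ⟨ih1, ih2⟩ := ih t2'.length hlen t2' rfl y (d + 1)
      (o + PySem.Int.mod (1 + (((t.takeWhile (fun y => y == x)).length : Nat) : Int)) 2) hsort2
    rw [List.foldl_cons, hstep]
    refine ⟨?_, ?_⟩
    · rw [ih1, runsRef_cons1 x t, ht2e]; ring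
    · rw [ih2, runsRef_cons2 x t, ht2e]; ring

-- runsRef of a sorted list counts distinct values and odd-multiplicity values.
lemma runsRef_spec : ∀ (n : Nat) (l : List Int), l.length = n → l.Pairwise (· ≤ ·) →
    (runsRef l).1 = ((PySem.Set.ofList l).length : Int) ∧
    (runsRef l).2 = (((PySem.Set.ofList l).countP
        (fun v => PySem.Int.mod ((l.count v : Int)) 2 == 1)) : Int) := by
  intro n
  induction n using Nat.strong_induction_on with
  | _ n ih =>
  intro l hn hsort
  match l with
  | [] => simp [runsRef]
  | x :: t =>
    have hsplit : t = t.takeWhile (fun y => y == x) ++ t.dropWhile (fun y => y == x) :=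
      (List.takeWhile_append_dropWhile).symm
    have ht1x : ∀ y ∈ t.takeWhile (fun y => y == x), y = x := by
      intro y hy
      have := List.mem_takeWhile_imp hy
      simpa using this
    have hsort' : t.Pairwise (· ≤ ·) := (List.pairwise_cons.mp hsort).2
    have hsort2 : (t.dropWhile (fun y => y == x)).Pairwise (· ≤ ·) :=
      List.Pairwise.sublist (t.dropWhile_sublist _) hsort'
    have hxt2 : x ∉ t.dropWhile (fun y => y == x) := by
      intro hx
      cases ht2e : t.dropWhile (fun y => y == x) with
      | nil => rw [ht2e] at hx; simp at hx
      | cons y t2' =>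
        have hyx : y ≠ x := dropWhile_head_ne t x y t2' ht2e
        rw [ht2e] at hx
        have hsort2' : (y :: t2').Pairwise (· ≤ ·) := ht2e ▸ hsort2
        have hxle : ∀ z ∈ t2', y ≤ z := (List.pairwise_cons.mp hsort2').1
        have hyx2 : x ≤ y := by
          have hall := (List.pairwise_cons.mp hsort).1
          apply hall
          rw [hsplit, ht2e]; simp
        rcases List.mem_cons.mp hx with h | h
        · exact hyx h.symm
        · exact hyx (le_antisymm (hxle x h) hyx2)
    have hmem : ∀ y, y ∈ x :: t ↔ y ∈ (x :: t.dropWhile (fun y => y == x)) := by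
      intro y
      constructor
      · intro hy
        rcases List.mem_cons.mp hy with h | h
        · simp [h]
        · rw [hsplit] at h
          rcases List.mem_append.mp h with h | h
          · simp [ht1x y h]
          · simp [h]
      · intro hy
        rcases List.mem_cons.mp hy with h | h
        · simp [h]
        · right; rw [hsplit]; exact List.mem_append.mpr (Or.inr h)
    have hperm : (PySem.Set.ofList (x :: t)).Perm (x :: PySem.Set.ofList (t.dropWhile (fun y => y == x))) := by
      rw [List.perm_ext_iff_of_nodup (PySem.Set.nodup_ofList _)
        (List.nodup_cons.mpr ⟨by simpa [PySem.Set.mem_ofList] using hxt2, PySem.Set.nodup_ofList _⟩)]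
      intro a
      rw [PySem.Set.mem_ofList, hmem a]
      simp [PySem.Set.mem_ofList]
    have hcountx : (x :: t).count x = 1 + (t.takeWhile (fun y => y == x)).length := by
      rw [List.count_cons_self]
      conv_lhs => rw [hsplit]
      rw [List.count_append]
      have h1 : (t.takeWhile (fun y => y == x)).count x = (t.takeWhile (fun y => y == x)).length := by
        rw [List.count_eq_length]
        intro y hy; simp [ht1x y hy]
      have h2 : (t.dropWhile (fun y => y == x)).count x = 0 := List.count_eq_zero.mpr hxt2
      omega
    have hcountt2 : ∀ v ∈ t.dropWhile (fun y => y == x),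
        (x :: t).count v = (t.dropWhile (fun y => y == x)).count v := by
      intro v hv
      have hvx : v ≠ x := fun h => hxt2 (h ▸ hv)
      have hcc : (x :: t).count v = t.count v := by
        simp [List.count_cons]
        exact fun h => hvx h.symm
      rw [hcc]
      conv_lhs => rw [hsplit]
      rw [List.count_append]
      have h1 : (t.takeWhile (fun y => y == x)).count v = 0 := by
        rw [List.count_eq_zero]
        intro hv1; exact hvx (ht1x v hv1)
      omega
    have hlen2 : (t.dropWhile (fun y => y == x)).length < n := by
      have h1 : (t.dropWhile (fun y => y == x)).length ≤ t.length :=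
        (t.dropWhile_sublist _).length_le
      simp at hn; omega
    obtain ⟨ih1, ih2⟩ := ih (t.dropWhile (fun y => y == x)).length hlen2 _ rfl hsort2
    refine ⟨?_, ?_⟩
    · rw [runsRef_cons1, ih1, hperm.length_eq]
      simp
    · have hcongr : (PySem.Set.ofList (t.dropWhile (fun y => y == x))).countP
            (fun v => PySem.Int.mod (((x :: t).count v : Int)) 2 == 1)
          = (PySem.Set.ofList (t.dropWhile (fun y => y == x))).countP
            (fun v => PySem.Int.mod (((t.dropWhile (fun y => y == x)).count v : Int)) 2 == 1) := by
        apply List.countP_congr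
        intro a ha
        rw [hcountt2 a ((PySem.Set.mem_ofList _ _).mp ha)]
      rw [runsRef_cons2 x t, hperm.countP_eq, List.countP_cons, hcongr, ih2, hcountx]
      have hm := PySem.Int.mod_natCast (1 + (t.takeWhile (fun y => y == x)).length) 2
      by_cases hodd : (1 + (t.takeWhile (fun y => y == x)).length) % 2 = 1
      · rw [hodd] at hm
        push_cast at hm ⊢
        rw [hm]
        simp
      · have h0 : (1 + (t.takeWhile (fun y => y == x)).length) % 2 = 0 := by omega
        rw [h0] at hm
        push_cast at hm ⊢
        rw [hm]
        simp

-- A reduces to the set/count formulation.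
lemma A_val (candies : List Int) :
    dist_candies candies
      = PySem.Int.floordiv ((PySem.Set.ofList candies).length : Int) 2
        + (((PySem.Set.ofList candies).countP
            (fun v => PySem.Int.mod ((candies.count v : Int)) 2 == 1)) : Int) := by
  unfold dist_candies
  simp only [PySem.Dict.keys_counter, PySem.Dict.getD_counter]
  rw [PySem.List.foldl_if_add_one]

-- The two sides agree.
theorem dist_candies_eq (candies : List Int) : dist_candies candies = dist_candies_alt candies := by
  rw [A_val]
  unfold dist_candies_alt
  have hsorted : (PySem.List.sorted candies (fun v => v) false).Pairwise (· ≤ ·) := by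
    have := PySem.List.sorted_pairwise (xs := candies) (key := fun v => v)
    simpa using this
  have hperm : (PySem.List.sorted candies (fun v => v) false).Perm candies :=
    PySem.List.sorted_perm candies (fun v => v) false
  have hsetperm : (PySem.Set.ofList (PySem.List.sorted candies (fun v => v) false)).Perm
      (PySem.Set.ofList candies) := by
    rw [List.perm_ext_iff_of_nodup (PySem.Set.nodup_ofList _) (PySem.Set.nodup_ofList _)]
    intro a
    rw [PySem.Set.mem_ofList, PySem.Set.mem_ofList]
    exact hperm.mem_iff
  cases hse : PySem.List.sorted candies (fun v => v) false with
  | nil =>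
    have hc : candies = [] := by
      have h := hperm
      rw [hse] at h
      exact h.symm.eq_nil
    subst hc
    decide
  | cons x t =>
    rw [hse] at hsorted hperm hsetperm
    dsimp only
    have h0 : (x :: t).foldl pvStep (0, 0, 0, none) = t.foldl pvStep (0 + 1, 0, 1, some x) := by
      rw [List.foldl_cons]
      simp [pvStep]
    obtain ⟨h1, h2⟩ := pvStep_main t.length t rfl x 0 0 hsorted
    obtain ⟨r1, r2⟩ := runsRef_spec (x :: t).length (x :: t) rfl hsorted
    have hlen : (PySem.Set.ofList (x :: t)).length = (PySem.Set.ofList candies).length :=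
      hsetperm.length_eq
    have hcnt : (PySem.Set.ofList (x :: t)).countP (fun v => PySem.Int.mod (((x :: t).count v : Int)) 2 == 1)
        = (PySem.Set.ofList candies).countP (fun v => PySem.Int.mod ((candies.count v : Int)) 2 == 1) := by
      rw [hsetperm.countP_eq]
      apply List.countP_congr
      intro a _
      rw [hperm.count_eq a]
    rw [h0, h1, r1, hlen]
    have h3 : (t.foldl pvStep (0 + 1, 0, 1, some x)).2.1
        + PySem.Int.mod (t.foldl pvStep (0 + 1, 0, 1, some x)).2.2.1 2
        = ((PySem.Set.ofList candies).countP (fun v => PySem.Int.mod ((candies.count v : Int)) 2 == 1) : Int) := by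
      rw [h2, r2, hcnt]; ring
    rw [h3]
    norm_num

-- ===== VERDICT (by name: the statement is the Claim_ definition above) =====
theorem dist_candies_spec : Claim_equal_dist_candies := by
  intro candies _
  exact dist_candies_eq candies
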